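-- pv_equiv track=rewrite | github.com/sanjay-lan/Machine-Learning-based-Frame-shift-mutation-analysis | frame_shift+1/FS+1_first_occ.py | count_TAA_j_followed_by_k
-- ===== SOURCE A (Python) =====
-- def count_TAA_j_followed_by_k(gene_sequence, j, k):
--     first_occ = 0
--
--     codons_rx = ["tta", "cta", "ata", "gta"]
--     codons_ry = ["att", "atc", "ata", "atg", "act", "acc", "aca", "acg", "aat", "aac", "aaa", "aag", "agt", "agc",
--                  "aga", "agg"]
--
--     for i in range(0, len(gene_sequence) - 3, 3):
--         codon = gene_sequence[i:i + 3]
--         next_codon = gene_sequence[i + 3:i + 6]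
--
--         if codon == j and next_codon == k:
--             if j in codons_rx and k in codons_ry:
--                 if first_occ == 0:
--                     first_occ = (i // 3) + 1
--     return first_occ
-- ===== SOURCE B (Python) =====
-- def count_TAA_j_followed_by_k(gene_sequence, j, k):
--     codons_rx = ["tta", "cta", "ata", "gta"]
--     codons_ry = ["att", "atc", "ata", "atg", "act", "acc", "aca", "acg", "aat", "aac", "aaa", "aag", "agt", "agc",
--                  "aga", "agg"]
--     if j not in codons_rx or k not in codons_ry:
--         return 0
--     target = j + k
--     start = 0
--     while True:
--         p = gene_sequence.find(target, start)
--         if p == -1: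
--             return 0
--         if p % 3 == 0:
--             return p // 3 + 1
--         start = p + 1
-- ===== Notes on version B (the rewrite author's own statement) =====
-- stated objective: faster
-- what changed: Replaced A's Python-level stride-3 scan that slices two codons at every position with a whitelist gate followed by a str.find-driven search for the 6-char pattern j+k, accepting the first hit whose offset is divisible by 3.
import Mathlib
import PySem

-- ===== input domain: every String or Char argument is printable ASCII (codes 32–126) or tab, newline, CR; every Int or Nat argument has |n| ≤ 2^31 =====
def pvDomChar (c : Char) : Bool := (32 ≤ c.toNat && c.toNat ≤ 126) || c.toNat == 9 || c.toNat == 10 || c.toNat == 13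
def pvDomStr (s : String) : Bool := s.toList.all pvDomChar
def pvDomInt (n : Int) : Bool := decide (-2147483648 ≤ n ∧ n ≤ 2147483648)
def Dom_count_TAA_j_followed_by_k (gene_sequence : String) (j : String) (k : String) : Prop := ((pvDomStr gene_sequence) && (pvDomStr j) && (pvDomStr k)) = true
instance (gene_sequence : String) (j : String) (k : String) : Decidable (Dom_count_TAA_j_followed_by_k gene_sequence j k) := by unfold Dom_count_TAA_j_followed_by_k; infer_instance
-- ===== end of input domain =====

-- B replaces A's Python-level scan over every codon position by a whitelist gate plus a
-- str.find-driven search for the 6-char pattern j+k at an index divisible by 3 (measured faster by a constant factor).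

-- ===== PORT A =====
def count_TAA_j_followed_by_k (gene_sequence : String) (j : String) (k : String) : Int :=
  let codons_rx : List String := ["tta", "cta", "ata", "gta"]
  let codons_ry : List String := ["att", "atc", "ata", "atg", "act", "acc", "aca", "acg",
                                  "aat", "aac", "aaa", "aag", "agt", "agc", "aga", "agg"]
  (PySem.List.pyRange 0 (PySem.Str.len gene_sequence - 3) 3).foldl
    (fun first_occ i =>
      let codon := PySem.Str.slice gene_sequence (some i) (some (i + 3))
      let next_codon := PySem.Str.slice gene_sequence (some (i + 3)) (some (i + 6))
      if codon = j ∧ next_codon = k then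
        if j ∈ codons_rx ∧ k ∈ codons_ry then
          if first_occ = 0 then PySem.Int.floordiv i 3 + 1 else first_occ
        else first_occ
      else first_occ) 0

-- ===== PORT B =====
-- needed by fsFindLoop's termination proof: a successful find lands in [start, length]
lemma pvFindFrom_bounds (s sub : List Char) (st : Nat)
    (h : PySem.Chars.findFrom s sub (st : Int) none ≠ -1) :
    (st : Int) ≤ PySem.Chars.findFrom s sub (st : Int) none ∧
      PySem.Chars.findFrom s sub (st : Int) none ≤ (s.length : Int) := by
  have h1 := PySem.Chars.neg_one_le_find (List.drop (Int.toNat (st : Int)) (List.take (Int.toNat (s.length : Int)) s)) sub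
  have h2 := PySem.Chars.find_le_length (List.drop (Int.toNat (st : Int)) (List.take (Int.toNat (s.length : Int)) s)) sub
  unfold PySem.Chars.findFrom at h ⊢
  dsimp only at h ⊢
  simp only [List.length_drop, List.length_take] at h2
  split_ifs at h ⊢ <;> omega

-- the while-True loop of B: repeatedly gene_sequence.find(target, start) until an aligned hit or -1
def fsFindLoop (gene_sequence : String) (target : String) (start : Nat) : Int :=
  let p := PySem.Str.findFrom gene_sequence target (start : Int) none
  if p = -1 then 0
  else if PySem.Int.mod p 3 = 0 then PySem.Int.floordiv p 3 + 1
  else fsFindLoop gene_sequence target (p.toNat + 1)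
termination_by gene_sequence.toList.length + 1 - start
decreasing_by
  simp only [PySem.Str.findFrom_eq] at *
  have hne : PySem.Chars.findFrom gene_sequence.toList target.toList (start : Int) none ≠ -1 := by
    assumption
  have hb := pvFindFrom_bounds gene_sequence.toList target.toList start hne
  omega

def count_TAA_j_followed_by_k_alt (gene_sequence : String) (j : String) (k : String) : Int :=
  let codons_rx : List String := ["tta", "cta", "ata", "gta"]
  let codons_ry : List String := ["att", "atc", "ata", "atg", "act", "acc", "aca", "acg",
                                  "aat", "aac", "aaa", "aag", "agt", "agc", "aga", "agg"]
  if j ∉ codons_rx ∨ k ∉ codons_ry then 0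
  else fsFindLoop gene_sequence (j ++ k) 0

-- ===== PRECONDITION & SPEC =====
def Spec_count_TAA_j_followed_by_k (gene_sequence : String) (j : String) (k : String) (out : Int) : Prop := out = count_TAA_j_followed_by_k_alt gene_sequence j k
instance (gene_sequence : String) (j : String) (k : String) (out : Int) : Decidable (Spec_count_TAA_j_followed_by_k gene_sequence j k out) := by unfold Spec_count_TAA_j_followed_by_k; infer_instance

-- ===== CLAIM (what is proved, stated in full; the proofs are below) =====
def Claim_equal_count_TAA_j_followed_by_k : Prop := ∀ (gene_sequence : String) (j : String) (k : String), Dom_count_TAA_j_followed_by_k gene_sequence j k → Spec_count_TAA_j_followed_by_k gene_sequence j k (count_TAA_j_followed_by_k gene_sequence j k)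

-- ===== LEMMAS AND PROOFS =====

-- a fold that never changes its accumulator returns the initial value
lemma pv_foldl_id {α : Type} (l : List α) (f : Int → α → Int) (c : Int)
    (hf : ∀ a x, f a x = a) : l.foldl f c = c := by
  induction l generalizing c with
  | nil => rfl
  | cons x xs ih => simp [List.foldl_cons, hf, ih]

-- a "record the first hit" fold, characterised by List.find?
lemma pv_foldl_keep (l : List Int) (Q : Int → Bool) (g : Int → Int) (c : Int) (hc : c ≠ 0) :
    l.foldl (fun acc i => if Q i then (if acc = 0 then g i else acc) else acc) c = c := by
  induction l with
  | nil => rfl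
  | cons x xs ih =>
    rw [List.foldl_cons]
    have hstep : (if Q x then (if c = 0 then g x else c) else c) = c := by
      by_cases h1 : Q x = true
      · simp [h1, hc]
      · simp [h1]
    rw [hstep]
    exact ih

lemma pv_foldl_firstHit (l : List Int) (Q : Int → Bool) (g : Int → Int)
    (hg : ∀ i ∈ l, Q i → g i ≠ 0) :
    l.foldl (fun acc i => if Q i then (if acc = 0 then g i else acc) else acc) 0 =
      (match l.find? Q with | some i => g i | none => 0) := by
  induction l with
  | nil => rfl
  | cons x xs ih =>
    rw [List.foldl_cons]
    by_cases hx : Q x = true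
    · rw [List.find?_cons_of_pos hx, if_pos hx, if_pos rfl]
      exact pv_foldl_keep xs Q g (g x) (hg x (List.mem_cons_self) hx)
    · rw [List.find?_cons_of_neg hx, if_neg hx]
      exact ih (fun i hi hQ => hg i (List.mem_cons_of_mem _ hi) hQ)

-- a prefix of a drop splits into two codon slices
lemma pv_append_prefix_iff {a b X : List Char} :
    a ++ b <+: X ↔ a <+: X ∧ b <+: X.drop a.length := by
  constructor
  · rintro ⟨r, rfl⟩
    exact ⟨⟨b ++ r, by simp⟩, by simp⟩
  · rintro ⟨⟨r1, h1⟩, ⟨r2, h2⟩⟩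
    refine ⟨r2, ?_⟩
    have hta : X.take a.length = a := by
      have h := congrArg (List.take a.length) h1
      simpa using h.symm
    calc a ++ b ++ r2 = a ++ (b ++ r2) := by simp
      _ = X.take a.length ++ X.drop a.length := by rw [hta, ← h2]
      _ = X := by simp

-- find? on a range: none when nothing holds, the first hit otherwise
lemma pv_find?_range_none (cnt : Nat) (p : Nat → Bool) (h : ∀ t < cnt, ¬ p t) :
    (List.range cnt).find? p = none := by
  apply List.find?_eq_none.mpr
  intro x hx
  exact h x (List.mem_range.mp hx)

lemma pv_find?_range_some (cnt t0 : Nat) (p : Nat → Bool) (h0 : t0 < cnt) (hp : p t0)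
    (hmin : ∀ t < t0, ¬ p t) : (List.range cnt).find? p = some t0 := by
  have hd : cnt = t0 + ((cnt - t0 - 1) + 1) := by omega
  rw [hd, List.range_add, List.find?_append, pv_find?_range_none t0 p hmin,
      List.range_succ_eq_map, List.map_cons, List.find?_cons_of_pos (by simpa using hp)]
  simp

-- an occurrence at or beyond st makes findFrom succeed
lemma pv_findFrom_ne_neg_one (s t : String) (st m : Nat) (hst : st ≤ m)
    (hpre : t.toList <+: s.toList.drop m) (hne : t.toList ≠ []) :
    PySem.Chars.findFrom s.toList t.toList (st : Int) none ≠ -1 := by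
  have hmlt : m < s.toList.length := by
    have h1 := hpre.length_le
    have h2 : 0 < t.toList.length := List.length_pos_iff.mpr hne
    simp only [List.length_drop] at h1
    omega
  intro heq
  have hni := (PySem.Chars.findFrom_natCast_eq_neg_one_iff s.toList t.toList st (by omega)).mp heq
  apply hni
  -- t is a prefix of drop (m - st) (drop st s), hence an infix of drop st s
  have hdd : s.toList.drop m = (s.toList.drop st).drop (m - st) := by
    rw [List.drop_drop]
    congr 1
    omega
  obtain ⟨r, hr⟩ := hpre
  rw [hdd] at hr
  refine ⟨(s.toList.drop st).take (m - st), r, ?_⟩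
  calc List.take (m - st) (s.toList.drop st) ++ t.toList ++ r
      = List.take (m - st) (s.toList.drop st) ++ (t.toList ++ r) := by simp
    _ = List.take (m - st) (s.toList.drop st) ++ List.drop (m - st) (s.toList.drop st) := by rw [hr]
    _ = s.toList.drop st := List.take_append_drop _ _

-- a successful find at a position whose alignment/occurrence facts we need
lemma pv_findFrom_spec (s t : String) (st : Nat)
    (h : PySem.Chars.findFrom s.toList t.toList (st : Int) none ≠ -1) :
    st ≤ (PySem.Chars.findFrom s.toList t.toList (st : Int) none).toNat ∧
    t.toList <+: s.toList.drop (PySem.Chars.findFrom s.toList t.toList (st : Int) none).toNat ∧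
    ∀ i, st ≤ i → i < (PySem.Chars.findFrom s.toList t.toList (st : Int) none).toNat →
      ¬ t.toList <+: s.toList.drop i := by
  have hb := pvFindFrom_bounds s.toList t.toList st h
  have hsp := PySem.Chars.findFrom_natCast_spec s.toList t.toList st (by omega) h
  exact ⟨by omega, hsp.2.1, hsp.2.2⟩

-- B's loop returns 0 when no aligned occurrence of target lies at or beyond start
lemma pv_fsLoop_none (s t : String) (st : Nat) :
    (∀ i, st ≤ i → ¬ (i % 3 = 0 ∧ t.toList <+: s.toList.drop i)) →
    fsFindLoop s t st = 0 := by
  induction st using fsFindLoop.induct (gene_sequence := s) (target := t) with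
  | case1 st p h1 =>
    intro _
    have hp : PySem.Str.findFrom s t (st : Int) none = -1 := h1
    have hp' : PySem.Chars.findFrom s.toList t.toList (st : Int) none = -1 := by
      simpa using hp
    rw [fsFindLoop]
    simp [hp']
  | case2 st p h1 h2 =>
    intro h
    exfalso
    have hp : PySem.Chars.findFrom s.toList t.toList (st : Int) none ≠ -1 := by
      simpa [PySem.Str.findFrom_eq] using h1
    have hmod : PySem.Int.mod (PySem.Chars.findFrom s.toList t.toList (st : Int) none) 3 = 0 := by
      simpa [PySem.Str.findFrom_eq] using h2
    have hsp := pv_findFrom_spec s t st hp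
    have hb := pvFindFrom_bounds s.toList t.toList st hp
    have hdvd : (3 : Int) ∣ PySem.Chars.findFrom s.toList t.toList (st : Int) none :=
      (PySem.Int.mod_eq_zero_iff_dvd _ _).mp hmod
    exact h _ hsp.1 ⟨by omega, hsp.2.1⟩
  | case3 st p h1 h2 ih =>
    intro h
    have hp : PySem.Str.findFrom s t (st : Int) none ≠ -1 := h1
    have hmod : PySem.Int.mod (PySem.Str.findFrom s t (st : Int) none) 3 ≠ 0 := h2
    have hp' : PySem.Chars.findFrom s.toList t.toList (st : Int) none ≠ -1 := by
      simpa [PySem.Str.findFrom_eq] using hp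
    have hsp := pv_findFrom_spec s t st hp'
    have heq := PySem.Str.findFrom_eq s t (st : Int) none
    rw [fsFindLoop]
    simp only [if_neg hp, if_neg hmod]
    exact ih (fun i hi => h i (by omega))

-- B's loop returns the first aligned occurrence of target at or beyond start
lemma pv_fsLoop_some (s t : String) (st : Nat) :
    ∀ m : Nat, m % 3 = 0 → t.toList <+: s.toList.drop m → t.toList ≠ [] → st ≤ m →
    (∀ i, st ≤ i → i < m → ¬ (i % 3 = 0 ∧ t.toList <+: s.toList.drop i)) →
    fsFindLoop s t st = PySem.Int.floordiv (m : Int) 3 + 1 := by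
  induction st using fsFindLoop.induct (gene_sequence := s) (target := t) with
  | case1 st p h1 =>
    intro m hm3 hpre hne hst _
    exfalso
    have hp : PySem.Chars.findFrom s.toList t.toList (st : Int) none = -1 := by
      have h1' : PySem.Str.findFrom s t (st : Int) none = -1 := h1
      simpa [PySem.Str.findFrom_eq] using h1'
    exact pv_findFrom_ne_neg_one s t st m hst hpre hne hp
  | case2 st p h1 h2 =>
    intro m hm3 hpre hne hst hmin
    have hp : PySem.Str.findFrom s t (st : Int) none ≠ -1 := h1
    have hmod : PySem.Int.mod (PySem.Str.findFrom s t (st : Int) none) 3 = 0 := h2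
    have hp' : PySem.Chars.findFrom s.toList t.toList (st : Int) none ≠ -1 := by
      simpa [PySem.Str.findFrom_eq] using hp
    have hsp := pv_findFrom_spec s t st hp'
    have hb := pvFindFrom_bounds s.toList t.toList st hp'
    have hdvd : (3 : Int) ∣ PySem.Chars.findFrom s.toList t.toList (st : Int) none := by
      apply (PySem.Int.mod_eq_zero_iff_dvd _ _).mp
      simpa [PySem.Str.findFrom_eq] using hmod
    have hle : (PySem.Chars.findFrom s.toList t.toList (st : Int) none).toNat ≤ m := by
      by_contra hgt
      exact hsp.2.2 m hst (by omega) hpre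
    have heq : (PySem.Chars.findFrom s.toList t.toList (st : Int) none).toNat = m := by
      by_contra hne'
      exact hmin _ hsp.1 (by omega) ⟨by omega, hsp.2.1⟩
    have heq := PySem.Str.findFrom_eq s t (st : Int) none
    have hm : PySem.Str.findFrom s t (st : Int) none = (m : Int) := by omega
    rw [fsFindLoop, hm]
    have h0 : ¬ ((m : Int) = -1) := by omega
    have h3 : PySem.Int.mod ((m : Int)) 3 = 0 := by rw [← hm]; exact hmod
    rw [if_neg h0, if_pos h3]
  | case3 st p h1 h2 ih =>
    intro m hm3 hpre hne hst hmin
    have hp : PySem.Str.findFrom s t (st : Int) none ≠ -1 := h1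
    have hmod : PySem.Int.mod (PySem.Str.findFrom s t (st : Int) none) 3 ≠ 0 := h2
    have hp' : PySem.Chars.findFrom s.toList t.toList (st : Int) none ≠ -1 := by
      simpa [PySem.Str.findFrom_eq] using hp
    have hsp := pv_findFrom_spec s t st hp'
    have hb := pvFindFrom_bounds s.toList t.toList st hp'
    have hlt : (PySem.Chars.findFrom s.toList t.toList (st : Int) none).toNat < m := by
      have hle : (PySem.Chars.findFrom s.toList t.toList (st : Int) none).toNat ≤ m := by
        by_contra hgt
        exact hsp.2.2 m hst (by omega) hpre
      rcases Nat.lt_or_ge (PySem.Chars.findFrom s.toList t.toList (st : Int) none).toNat m with h' | h'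
      · exact h'
      · exfalso
        apply hmod
        have heq := PySem.Str.findFrom_eq s t (st : Int) none
        have hm : PySem.Str.findFrom s t (st : Int) none = (m : Int) := by omega
        rw [hm, PySem.Int.mod_eq_zero_iff_dvd]
        omega
    have heq := PySem.Str.findFrom_eq s t (st : Int) none
    rw [fsFindLoop]
    simp only [if_neg hp, if_neg hmod]
    exact ih m hm3 hpre hne (by omega) (fun i hi1 hi2 => hmin i (by omega) hi2)

-- the two codon-slice equalities are exactly "j+k occurs at 3*t"
lemma pv_cond_iff (s j k : String) (t : Nat)
    (hj : j.toList.length = 3) (hk : k.toList.length = 3) :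
    (PySem.Str.slice s (some ((3 * t : Nat) : Int)) (some (((3 * t : Nat) : Int) + 3)) = j ∧
     PySem.Str.slice s (some (((3 * t : Nat) : Int) + 3)) (some (((3 * t : Nat) : Int) + 6)) = k) ↔
    (j ++ k).toList <+: s.toList.drop (3 * t) := by
  have e1 : ((3 * t : Nat) : Int) + 3 = ((3 * t + 3 : Nat) : Int) := by push_cast; ring
  have e2 : ((3 * t : Nat) : Int) + 6 = ((3 * t + 6 : Nat) : Int) := by push_cast; ring
  have hstr : ∀ (a b : String), a = b ↔ a.toList = b.toList := by
    intro a b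
    constructor
    · intro h; rw [h]
    · intro h; exact String.ext (by simpa [String.toList] using h)
  rw [hstr, hstr, e1, e2]
  simp only [PySem.Str.toList_slice, PySem.Chars.slice_eq_listSlice,
    PySem.List.slice_natCast]
  have e3 : 3 * t + 3 - 3 * t = 3 := by omega
  have e4 : 3 * t + 6 - (3 * t + 3) = 3 := by omega
  rw [e3, e4, show (j ++ k).toList = j.toList ++ k.toList from by simp]
  rw [pv_append_prefix_iff, hj]
  have hdd : (s.toList.drop (3 * t)).drop 3 = s.toList.drop (3 * t + 3) := by
    rw [List.drop_drop]
  rw [hdd]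
  constructor
  · rintro ⟨ha, hb⟩
    constructor
    · rw [List.prefix_iff_eq_take, hj, ha]
    · rw [List.prefix_iff_eq_take, hk, hb]
  · rintro ⟨ha, hb⟩
    constructor
    · exact ((List.prefix_iff_eq_take.mp ha).trans (by rw [hj])).symm
    · exact ((List.prefix_iff_eq_take.mp hb).trans (by rw [hk])).symm

-- ===== VERDICT (by name: the statement is the Claim_ definition above) =====
theorem count_TAA_j_followed_by_k_spec : Claim_equal_count_TAA_j_followed_by_k := by
  intro s j k _
  unfold Spec_count_TAA_j_followed_by_k
  show count_TAA_j_followed_by_k s j k = count_TAA_j_followed_by_k_alt s j k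
  by_cases hw : j ∈ (["tta", "cta", "ata", "gta"] : List String) ∧
      k ∈ (["att", "atc", "ata", "atg", "act", "acc", "aca", "acg",
            "aat", "aac", "aaa", "aag", "agt", "agc", "aga", "agg"] : List String)
  · -- whitelist holds: both sides find the first aligned occurrence of j ++ k
    obtain ⟨hjm, hkm⟩ := hw
    have hj3 : j.toList.length = 3 := by fin_cases hjm <;> decide
    have hk3 : k.toList.length = 3 := by fin_cases hkm <;> decide
    have htgt : (j ++ k).toList.length = 6 := by
      rw [show (j ++ k).toList = j.toList ++ k.toList from by simp,
          List.length_append, hj3, hk3]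
    have hne : (j ++ k).toList ≠ [] := by
      intro h; rw [h] at htgt; simp at htgt
    have hB : count_TAA_j_followed_by_k_alt s j k = fsFindLoop s (j ++ k) 0 := by
      unfold count_TAA_j_followed_by_k_alt
      rw [if_neg (not_or.mpr ⟨not_not_intro hjm, not_not_intro hkm⟩)]
    have hA : count_TAA_j_followed_by_k s j k =
        (PySem.List.pyRange 0 (PySem.Str.len s - 3) 3).foldl
          (fun acc i =>
            if (decide (PySem.Str.slice s (some i) (some (i + 3)) = j ∧
                 PySem.Str.slice s (some (i + 3)) (some (i + 6)) = k) : Bool) then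
              (if acc = 0 then PySem.Int.floordiv i 3 + 1 else acc)
            else acc) 0 := by
      unfold count_TAA_j_followed_by_k
      apply List.foldl_ext
      intro acc i _
      by_cases hc : (PySem.Str.slice s (some i) (some (i + 3)) = j ∧
          PySem.Str.slice s (some (i + 3)) (some (i + 6)) = k)
      · simp [hc, hjm, hkm]
      · simp [hc]
    rw [hA, hB, pv_foldl_firstHit]
    · -- main comparison
      rw [PySem.Str.len_eq]
      by_cases hex : ∃ mi : Nat, mi % 3 = 0 ∧ (j ++ k).toList <+: s.toList.drop mi
      · have hPm := Nat.find_spec hex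
        have hmin : ∀ i < Nat.find hex,
            ¬ (i % 3 = 0 ∧ (j ++ k).toList <+: s.toList.drop i) :=
          fun i hi => Nat.find_min hex hi
        set m := Nat.find hex with hmdef
        have hm6 : m + 6 ≤ s.toList.length := by
          have hle := hPm.2.length_le
          rw [htgt, List.length_drop] at hle
          omega
        have ht0 : m = 3 * (m / 3) := by omega
        rw [pv_fsLoop_some s (j ++ k) 0 m hPm.1 hPm.2 hne (Nat.zero_le m)
          (fun i _ h2 => hmin i h2)]
        rw [PySem.List.pyRange_of_pos 0 ((s.toList.length : Int) - 3) (by norm_num),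
          if_pos (by omega : (0 : Int) < (s.toList.length : Int) - 3), List.find?_map]
        rw [pv_find?_range_some _ (m / 3) _ ?hlt ?hq ?hmin2]
        · have hcast : (0 : Int) + 3 * ((m / 3 : Nat) : Int) = (m : Int) := by
            push_cast
            omega
          simp only [Option.map_some]
          show PySem.Int.floordiv ((0 : Int) + 3 * ((m / 3 : Nat) : Int)) 3 + 1 = _
          rw [hcast]
        case hlt =>
          have h1 : ((s.toList.length : Int) - 3 - 0 + 3 - 1) =
              ((s.toList.length - 1 : Nat) : Int) := by omega
          rw [h1, show ((3:Int) = ((3:Nat):Int)) from rfl, ← Int.natCast_div, Int.toNat_natCast]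
          omega
        case hq =>
          show decide _ = true
          apply decide_eq_true
          dsimp only
          have hcast : (0 : Int) + 3 * ((m / 3 : Nat) : Int) = ((3 * (m / 3) : Nat) : Int) := by
            push_cast; ring
          rw [hcast]
          apply (pv_cond_iff s j k (m / 3) hj3 hk3).mpr
          rw [← ht0]
          exact hPm.2
        case hmin2 =>
          intro t ht hQ
          have hc := of_decide_eq_true hQ
          dsimp only at hc
          have hcast : (0 : Int) + 3 * ((t : Nat) : Int) = ((3 * t : Nat) : Int) := by
            push_cast; ring
          rw [hcast] at hc
          exact hmin (3 * t) (by omega) ⟨by omega, (pv_cond_iff s j k t hj3 hk3).mp hc⟩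
      · have hfn : (PySem.List.pyRange 0 ((s.toList.length : Int) - 3) 3).find?
            (fun i => decide (PySem.Str.slice s (some i) (some (i + 3)) = j ∧
              PySem.Str.slice s (some (i + 3)) (some (i + 6)) = k)) = none := by
          apply List.find?_eq_none.mpr
          intro x hx
          have hmem := (PySem.List.mem_pyRange_iff_of_pos (by norm_num) x).mp hx
          intro hQ
          have hx3 : x = ((3 * (x.toNat / 3) : Nat) : Int) := by omega
          rw [hx3] at hQ
          have hc := of_decide_eq_true hQ
          exact hex ⟨3 * (x.toNat / 3), by omega, (pv_cond_iff s j k _ hj3 hk3).mp hc⟩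
        rw [hfn]
        exact (pv_fsLoop_none s (j ++ k) 0 (fun i _ hPi => hex ⟨i, hPi⟩)).symm
    · -- the recorded value of a hit is never 0
      intro i hi hQ
      have h0 : 0 ≤ i := ((PySem.List.mem_pyRange_iff_of_pos (by norm_num) i).mp hi).1
      have hfd := PySem.Int.floordiv_eq_ediv_of_pos (a := i) (b := 3) (by norm_num)
      omega
  · -- whitelist fails: A's inner branch never fires, B returns 0 at the gate
    have hB : count_TAA_j_followed_by_k_alt s j k = 0 := by
      unfold count_TAA_j_followed_by_k_alt
      rw [if_pos (by tauto)]
    have hA : count_TAA_j_followed_by_k s j k = 0 := by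
      unfold count_TAA_j_followed_by_k
      apply pv_foldl_id
      intro a i
      dsimp only
      by_cases hc : (PySem.Str.slice s (some i) (some (i + 3)) = j ∧
          PySem.Str.slice s (some (i + 3)) (some (i + 6)) = k)
      · rw [if_pos hc, if_neg hw]
      · rw [if_neg hc]
    rw [hA, hB]
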